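-- pv_equiv track=rewrite | github.com/ulashuseyintelli-tech/C-Users-ulas.htelli-Desktop-Gelka-Enerji-hesaplama-tablosu | backend/app/guards/guard_decision.py | resolve_endpoint_risk_class
-- ===== SOURCE A (Python) =====
-- from enum import Enum
--
-- class RiskClass(str, Enum):
--     """Endpoint risk classification. Exactly 3 values — bounded cardinality.
--     Safe for metric labels (max 3 distinct values).
--     Feature: endpoint-class-policy, Requirements E2.1, E2.3
--     """
--     HIGH = "high"
--     MEDIUM = "medium"
--     LOW = "low"
--
-- def resolve_endpoint_risk_class(
--     endpoint: str,
--     risk_map: dict[str, RiskClass],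
-- ) -> RiskClass:
--     """
--     Normalized endpoint template → RiskClass çözümlemesi.
--
--     Precedence (sabit sıra, deterministik):
--       1. Exact match: endpoint == key
--       2. Longest prefix match: key endpoint'in prefix'i, en uzun kazanır
--       3. Default: LOW
--
--     Endpoint key'i normalize_endpoint() çıktısı (template) üzerinden
--     çözülür — raw path asla kullanılmaz.
--
--     Pure function: aynı input → aynı output, side-effect yok.
--
--     Feature: endpoint-class-policy, Requirements E3.3, E3.6, E3.7, E3.8
--     """
--     if not risk_map:
--         return RiskClass.LOW
--
--     # 1. Exact match
--     if endpoint in risk_map: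
--         return risk_map[endpoint]
--
--     # 2. Longest prefix match
--     best_prefix = ""
--     best_risk = None
--     for key, risk in risk_map.items():
--         if endpoint.startswith(key) and len(key) > len(best_prefix):
--             best_prefix = key
--             best_risk = risk
--
--     if best_risk is not None:
--         return best_risk
--
--     # 3. Default LOW
--     return RiskClass.LOW
-- ===== SOURCE B (Python) =====
-- from enum import Enum
--
-- class RiskClass(str, Enum):
--     HIGH = "high"
--     MEDIUM = "medium"
--     LOW = "low"
--
-- def resolve_endpoint_risk_class(endpoint, risk_map):
--     # Exact match first; then probe only the prefixes of the endpoint whose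
--     # length actually occurs among the keys, longest first, via dict lookup.
--     if endpoint in risk_map:
--         return risk_map[endpoint]
--     n = len(endpoint)
--     for i in sorted({len(k) for k in risk_map}, reverse=True):
--         if 0 < i < n:
--             cand = endpoint[:i]
--             if cand in risk_map:
--                 return risk_map[cand]
--     return RiskClass.LOW
-- ===== Notes on version B (the rewrite author's own statement) =====
-- stated objective: alternative
-- what changed: B replaces A's scan over all risk_map entries (tracking the best prefix seen) by direct dict lookups of the endpoint's own prefixes, probing only the distinct key lengths, longest first, and returning on the first hit.
import Mathlib
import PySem

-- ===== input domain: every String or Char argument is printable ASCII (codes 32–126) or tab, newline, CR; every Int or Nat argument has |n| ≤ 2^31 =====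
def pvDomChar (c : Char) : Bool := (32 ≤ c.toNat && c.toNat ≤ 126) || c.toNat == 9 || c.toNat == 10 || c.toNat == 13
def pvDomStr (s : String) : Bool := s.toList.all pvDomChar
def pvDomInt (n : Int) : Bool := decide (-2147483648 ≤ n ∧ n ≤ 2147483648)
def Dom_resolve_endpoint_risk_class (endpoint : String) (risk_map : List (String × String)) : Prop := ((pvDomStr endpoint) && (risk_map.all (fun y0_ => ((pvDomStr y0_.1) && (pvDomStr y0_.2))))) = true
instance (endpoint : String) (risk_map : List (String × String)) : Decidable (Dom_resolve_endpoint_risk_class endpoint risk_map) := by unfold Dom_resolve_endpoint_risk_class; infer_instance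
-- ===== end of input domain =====

-- B replaces A's scan over all risk_map entries by direct dict lookups of the
-- endpoint's own prefixes, longest first (objective: alternative decomposition).

-- shared dict-lookup helper: 'k in d' / 'd[k]' on the association list (first match)
def pyDictGet? (risk_map : List (String × String)) (k : String) : Option String :=
  (risk_map.find? (fun kv => kv.1 == k)).map (·.2)

-- ===== PORT A =====
def resolve_endpoint_risk_class (endpoint : String) (risk_map : List (String × String)) : String :=
  if risk_map.isEmpty then "low"
  else
    match pyDictGet? risk_map endpoint with   -- 1. exact match
    | some v => v
    | none =>
      -- 2. longest prefix match: scan every (key, risk), keep the longest prefix seen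
      let st := risk_map.foldl (fun (st : String × Option String) kv =>
        if PySem.Str.startswith endpoint kv.1 && decide (st.1.toList.length < kv.1.toList.length)
        then (kv.1, some kv.2) else st) ("", none)
      match st.2 with
      | some r => r
      | none => "low"                          -- 3. default LOW

-- ===== PORT B =====
-- 'for i in sorted({len(k) for k in risk_map}, reverse=True): if 0 < i < n: cand = endpoint[:i]; if cand in risk_map: return risk_map[cand]'
def altScan (endpoint : String) (risk_map : List (String × String)) : List Nat → String
  | [] => "low"
  | i :: rest =>
    if 0 < i ∧ i < endpoint.toList.length then
      match pyDictGet? risk_map (String.ofList (endpoint.toList.take i)) with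
      | some v => v
      | none => altScan endpoint risk_map rest
    else altScan endpoint risk_map rest

def resolve_endpoint_risk_class_alt (endpoint : String) (risk_map : List (String × String)) : String :=
  match pyDictGet? risk_map endpoint with     -- exact match first
  | some v => v
  | none => altScan endpoint risk_map
      (PySem.List.sorted (PySem.Set.ofList (risk_map.map (fun kv => kv.1.toList.length))) (fun x => x) true)

-- ===== PRECONDITION & SPEC =====
def Spec_resolve_endpoint_risk_class (endpoint : String) (risk_map : List (String × String)) (out : String) : Prop := out = resolve_endpoint_risk_class_alt endpoint risk_map
instance (endpoint : String) (risk_map : List (String × String)) (out : String) : Decidable (Spec_resolve_endpoint_risk_class endpoint risk_map out) := by unfold Spec_resolve_endpoint_risk_class; infer_instance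

-- ===== CLAIM (what is proved, stated in full; the proofs are below) =====
def Claim_equal_resolve_endpoint_risk_class : Prop := ∀ (endpoint : String) (risk_map : List (String × String)), Dom_resolve_endpoint_risk_class endpoint risk_map → Spec_resolve_endpoint_risk_class endpoint risk_map (resolve_endpoint_risk_class endpoint risk_map)

-- ===== LEMMAS AND PROOFS =====

-- a 'good' entry: its key is a non-empty prefix of the endpoint
def GoodKey (cs : List Char) (kv : String × String) : Prop :=
  kv.1.toList <+: cs ∧ 0 < kv.1.toList.length

theorem pyDictGet?_nil (k : String) : pyDictGet? [] k = none := rfl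

theorem pyDictGet?_eq_none_iff (rm : List (String × String)) (k : String) :
    pyDictGet? rm k = none ↔ ∀ kv ∈ rm, kv.1 ≠ k := by
  simp [pyDictGet?, List.find?_eq_none]

theorem altScan_of_all_none (endpoint : String) (rm : List (String × String)) (L : List Nat)
    (h : ∀ j, 1 ≤ j → j < endpoint.toList.length → pyDictGet? rm (String.ofList (endpoint.toList.take j)) = none) :
    altScan endpoint rm L = "low" := by
  induction L with
  | nil => rfl
  | cons i rest ih =>
    simp only [altScan]
    split
    · next hcond => rw [h i (by omega) hcond.2]; exact ih
    · exact ih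

theorem altScan_hit (endpoint : String) (rm : List (String × String)) (L : List Nat) (m : Nat) (v : String)
    (hpw : L.Pairwise (fun a b => b ≤ a)) (hm : m ∈ L)
    (h0 : 0 < m) (hn : m < endpoint.toList.length)
    (hhit : pyDictGet? rm (String.ofList (endpoint.toList.take m)) = some v)
    (habove : ∀ j, m < j → j < endpoint.toList.length → pyDictGet? rm (String.ofList (endpoint.toList.take j)) = none) :
    altScan endpoint rm L = v := by
  induction L with
  | nil => exact absurd hm (List.not_mem_nil)
  | cons i rest ih =>
    rcases List.pairwise_cons.mp hpw with ⟨hi, hrest⟩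
    by_cases him : i = m
    · subst him
      simp only [altScan, hhit]
      rw [if_pos ⟨h0, hn⟩]
    · have hmrest : m ∈ rest := by
        rcases List.mem_cons.mp hm with h | h
        · exact absurd h.symm him
        · exact h
      have hmi : m < i := lt_of_le_of_ne (hi m hmrest) (fun h => him h.symm)
      simp only [altScan]
      split
      · next hcond => rw [habove i hmi hcond.2]; exact ih hrest hmrest
      · exact ih hrest hmrest

-- the fold step of port A
def stepA (endpoint : String) (st : String × Option String) (kv : String × String) : String × Option String :=
  if PySem.Str.startswith endpoint kv.1 && decide (st.1.toList.length < kv.1.toList.length)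
  then (kv.1, some kv.2) else st

-- invariant characterising A's fold over a processed list l
def InvA (endpoint : String) (l : List (String × String)) (st : String × Option String) : Prop :=
  (st = ("", none) ∧ ∀ kv ∈ l, ¬ GoodKey endpoint.toList kv) ∨
  (∃ v, st.2 = some v ∧ GoodKey endpoint.toList (st.1, v) ∧
    pyDictGet? l st.1 = some v ∧
    ∀ kv ∈ l, GoodKey endpoint.toList kv → kv.1.toList.length ≤ st.1.toList.length)

theorem startswith_iff_good (endpoint k : String) :
    PySem.Str.startswith endpoint k = true ↔ k.toList <+: endpoint.toList := by
  simp [PySem.Str.startswith, PySem.Chars.startswith_iff]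

theorem find?_append_none {α : Type} (p : α → Bool) (l : List α) (x : α)
    (h : l.find? p = none) : (l ++ [x]).find? p = (if p x then some x else none) := by
  rw [List.find?_append, h]; cases hp : p x <;> simp [List.find?, hp]

theorem invA_step (endpoint : String) (l : List (String × String)) (x : String × String)
    (st : String × Option String) (h : InvA endpoint l st) :
    InvA endpoint (l ++ [x]) (stepA endpoint st x) := by
  have hfind_pres : ∀ k v, pyDictGet? l k = some v → pyDictGet? (l ++ [x]) k = some v := by
    intro k v hv
    simp only [pyDictGet?, Option.map_eq_some_iff] at hv ⊢
    obtain ⟨kv, hf, hkv⟩ := hv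
    exact ⟨kv, by rw [List.find?_append, hf]; rfl, hkv⟩
  rcases h with ⟨hst, hnone⟩ | ⟨v, hv, hgood, hget, hmax⟩
  · subst hst
    simp only [stepA]
    by_cases hcond : (PySem.Str.startswith endpoint x.1 && decide (("" : String).toList.length < x.1.toList.length)) = true
    · rw [if_pos hcond]
      simp only [Bool.and_eq_true, decide_eq_true_eq] at hcond
      have hgx : GoodKey endpoint.toList x := ⟨(startswith_iff_good _ _).mp hcond.1, by simpa using hcond.2⟩
      refine Or.inr ⟨x.2, rfl, hgx, ?_, ?_⟩
      · have hnotin : l.find? (fun kv => kv.1 == x.1) = none := by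
          rw [List.find?_eq_none]
          intro kv hkv
          simp only [beq_iff_eq]
          intro heq
          exact hnone kv hkv (by simp only [GoodKey, heq]; exact hgx)
        simp only [pyDictGet?]
        rw [find?_append_none _ _ _ hnotin]
        simp
      · intro kv hkv hgkv
        rcases List.mem_append.mp hkv with h1 | h2
        · exact absurd hgkv (hnone kv h1)
        · simp only [List.mem_singleton] at h2; subst h2; exact le_refl _
    · rw [if_neg hcond]
      refine Or.inl ⟨rfl, ?_⟩
      intro kv hkv
      rcases List.mem_append.mp hkv with h1 | h2
      · exact hnone kv h1
      · simp only [List.mem_singleton] at h2; subst h2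
        intro ⟨hpre, hlen⟩
        refine hcond ?_
        simp only [Bool.and_eq_true, decide_eq_true_eq]
        exact ⟨(startswith_iff_good _ _).mpr hpre, by simpa using hlen⟩
  · simp only [stepA]
    by_cases hcond : (PySem.Str.startswith endpoint x.1 && decide (st.1.toList.length < x.1.toList.length)) = true
    · rw [if_pos hcond]
      simp only [Bool.and_eq_true, decide_eq_true_eq] at hcond
      have hgx : GoodKey endpoint.toList x := ⟨(startswith_iff_good _ _).mp hcond.1, by omega⟩
      refine Or.inr ⟨x.2, rfl, hgx, ?_, ?_⟩
      · have hnotin : l.find? (fun kv => kv.1 == x.1) = none := by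
          rw [List.find?_eq_none]
          intro kv hkv
          simp only [beq_iff_eq]
          intro heq
          have := hmax kv hkv (by simp only [GoodKey, heq]; exact hgx)
          rw [heq] at this
          omega
        simp only [pyDictGet?]
        rw [find?_append_none _ _ _ hnotin]
        simp
      · intro kv hkv hgkv
        rcases List.mem_append.mp hkv with h1 | h2
        · have := hmax kv h1 hgkv
          show kv.1.toList.length ≤ x.1.toList.length
          omega
        · simp only [List.mem_singleton] at h2; subst h2; exact le_refl _
    · rw [if_neg hcond]
      refine Or.inr ⟨v, hv, hgood, hfind_pres _ _ hget, ?_⟩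
      intro kv hkv hgkv
      rcases List.mem_append.mp hkv with h1 | h2
      · exact hmax kv h1 hgkv
      · simp only [List.mem_singleton] at h2; subst h2
        have hs : PySem.Str.startswith endpoint kv.1 = true := (startswith_iff_good _ _).mpr hgkv.1
        simp only [Bool.and_eq_true, decide_eq_true_eq, hs, true_and, not_lt] at hcond
        exact hcond

theorem invA_foldl (endpoint : String) (rm : List (String × String)) :
    InvA endpoint rm (rm.foldl (stepA endpoint) ("", none)) := by
  induction rm using List.reverseRecOn with
  | nil => exact Or.inl ⟨rfl, by simp⟩
  | append_singleton l x ih =>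
    rw [List.foldl_append, List.foldl_cons, List.foldl_nil]
    exact invA_step endpoint l x _ ih

-- with no entry keyed by take j of the endpoint for any good j, every altScan probe misses
theorem probe_none_of_no_good (endpoint : String) (rm : List (String × String))
    (hno : ∀ kv ∈ rm, ¬ GoodKey endpoint.toList kv)
    (j : Nat) (hj1 : 1 ≤ j) (hjn : j ≤ endpoint.toList.length) :
    pyDictGet? rm (String.ofList (endpoint.toList.take j)) = none := by
  rw [pyDictGet?_eq_none_iff]
  intro kv hkv heq
  apply hno kv hkv
  have hl : kv.1.toList = endpoint.toList.take j := by rw [heq]; simp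
  constructor
  · rw [hl]; exact List.take_prefix _ _
  · rw [hl, List.length_take]; omega

-- main bridge: when the exact lookup misses, A's fold result equals B's prefix scan
theorem fold_eq_altScan (endpoint : String) (rm : List (String × String))
    (hex : pyDictGet? rm endpoint = none) :
    (match (rm.foldl (stepA endpoint) ("", none)).2 with
     | some r => r
     | none => "low") =
    altScan endpoint rm
      (PySem.List.sorted (PySem.Set.ofList (rm.map (fun kv => kv.1.toList.length))) (fun x => x) true) := by
  have hpw : (PySem.List.sorted (PySem.Set.ofList (rm.map (fun kv => kv.1.toList.length))) (fun x => x) true).Pairwise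
      (fun a b => b ≤ a) := PySem.List.sorted_pairwise_rev _ _
  rcases invA_foldl endpoint rm with ⟨hst, hno⟩ | ⟨v, hv, hgood, hget, hmax⟩
  · rw [hst]
    exact (altScan_of_all_none endpoint rm _
      (fun j h1 h2 => probe_none_of_no_good endpoint rm hno j h1 (by omega))).symm
  · rw [hv]
    set st := rm.foldl (stepA endpoint) ("", none) with hstdef
    set m := st.1.toList.length with hm
    have hpre : st.1.toList <+: endpoint.toList := hgood.1
    have hm1 : 1 ≤ m := hgood.2
    have hmn : m ≤ endpoint.toList.length := hpre.length_le
    have htake : st.1.toList = endpoint.toList.take m := List.prefix_iff_eq_take.mp hpre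
    have hmne : m ≠ endpoint.toList.length := by
      intro h
      have : st.1.toList = endpoint.toList := by
        rw [htake, h, List.take_length]
      have h2 : st.1 = endpoint := String.toList_inj.mp this
      rw [h2] at hget
      rw [hex] at hget
      simp at hget
    have hofl : String.ofList (endpoint.toList.take m) = st.1 := by
      apply String.toList_inj.mp; rw [htake]; simp
    have hmem : m ∈ PySem.List.sorted (PySem.Set.ofList (rm.map (fun kv => kv.1.toList.length))) (fun x => x) true := by
      rw [PySem.List.mem_sorted, PySem.Set.mem_ofList, List.mem_map]
      -- the best key st.1 is itself a key of rm, so its length occurs among the key lengths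
      simp only [pyDictGet?, Option.map_eq_some_iff] at hget
      obtain ⟨kv, hf, _⟩ := hget
      have hkv : kv ∈ rm := List.mem_of_find?_eq_some hf
      have hkeq : kv.1 = st.1 := by simpa using List.find?_some hf
      exact ⟨kv, hkv, by rw [hkeq]⟩
    refine (altScan_hit endpoint rm _ m v hpw hmem hm1 (by omega) (by rw [hofl]; exact hget) ?_).symm
    intro j' hj' hj'n
    rw [pyDictGet?_eq_none_iff]
    intro kv hkv heq
    have hl : kv.1.toList = endpoint.toList.take j' := by rw [heq]; simp
    have hlen : kv.1.toList.length = j' := by rw [hl, List.length_take]; omega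
    have hgkv : GoodKey endpoint.toList kv := by
      constructor
      · rw [hl]; exact List.take_prefix _ _
      · omega
    have := hmax kv hkv hgkv
    omega

-- ===== VERDICT (by name: the statement is the Claim_ definition above) =====
theorem resolve_endpoint_risk_class_spec : Claim_equal_resolve_endpoint_risk_class := by
  intro endpoint risk_map _
  unfold Spec_resolve_endpoint_risk_class
  unfold resolve_endpoint_risk_class resolve_endpoint_risk_class_alt
  by_cases hemp : risk_map.isEmpty
  · rw [if_pos hemp]
    rw [List.isEmpty_iff] at hemp
    subst hemp
    rw [pyDictGet?_nil]
    exact (altScan_of_all_none endpoint [] _ (fun j _ _ => pyDictGet?_nil _)).symm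
  · rw [if_neg hemp]
    cases hex : pyDictGet? risk_map endpoint with
    | some v => rfl
    | none =>
      exact fold_eq_altScan endpoint risk_map hex
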